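-- pv_equiv track=rewrite | github.com/SharmaRithik/Heterogeneous-Sparse-Algebra | matmul_formats/bsr_matmul.py | get_block_sizes
-- ===== SOURCE A (Python) =====
-- def get_block_sizes(matrix_sparse):
--     main_matrix = []
--     sub_matrix = []
--     row = len(matrix_sparse)
--     column = len(matrix_sparse[0])
--     for i in range(1,row):
--         for j in range(1,column):
--             if(row % i == 0):
--                 if(column % j == 0):
--                     sub_matrix.append([i,j])
--     # main_matrix contains list of all possible block sizes
--     main_matrix.append(sub_matrix)
--
--     return main_matrix
-- ===== SOURCE B (Python) =====
-- def _divisors_desc(n):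
--     # proper divisors of n (strictly below n), in descending order
--     divs = []
--     d = n - 1
--     while d >= 1:
--         if n % d == 0:
--             divs.append(d)
--         d -= 1
--     return divs
--
--
-- def get_block_sizes(matrix_sparse):
--     row_divs = _divisors_desc(len(matrix_sparse))
--     col_divs = _divisors_desc(len(matrix_sparse[0]))
--     rev = [[i, j] for i in row_divs for j in col_divs]
--     rev.reverse()
--     return [rev]
-- ===== Notes on version B (the rewrite author's own statement) =====
-- stated objective: faster
-- what changed: B scans each dimension once from n-1 down to 1 collecting its proper divisors in descending order, forms the cross product of the two divisor lists and reverses it, instead of A's nested loop that trial-tests every (i,j) pair of the full row*column grid.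
import Mathlib
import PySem

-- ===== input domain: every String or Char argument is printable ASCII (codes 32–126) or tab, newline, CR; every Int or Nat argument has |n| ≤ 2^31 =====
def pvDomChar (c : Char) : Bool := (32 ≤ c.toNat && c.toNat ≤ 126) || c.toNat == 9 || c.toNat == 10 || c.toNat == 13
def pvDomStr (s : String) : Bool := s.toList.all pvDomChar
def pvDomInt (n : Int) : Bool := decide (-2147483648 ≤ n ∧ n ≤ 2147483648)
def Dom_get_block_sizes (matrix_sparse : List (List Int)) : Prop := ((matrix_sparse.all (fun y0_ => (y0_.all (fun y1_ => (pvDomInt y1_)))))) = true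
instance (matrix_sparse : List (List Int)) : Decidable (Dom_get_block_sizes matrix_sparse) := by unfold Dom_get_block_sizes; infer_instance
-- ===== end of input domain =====

-- B scans each dimension once, descending, to collect its proper divisors, then takes the
-- cross product of the two divisor lists and reverses it, replacing A's nested loop over
-- the full row*column grid (objective: faster).

-- ===== PORT A =====
def get_block_sizes (matrix_sparse : List (List Int)) : List (List (List Int)) :=
  match PySem.List.pyGet? matrix_sparse 0 with
  | none => []        -- matrix_sparse[0] raises IndexError; excluded by Pre_
  | some row0 =>
    let row : Int := matrix_sparse.length
    let column : Int := row0.length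
    let sub_matrix : List (List Int) :=
      (PySem.List.pyRange 1 row 1).foldl (fun acc i =>
        (PySem.List.pyRange 1 column 1).foldl (fun acc2 j =>
          if PySem.Int.mod row i = 0 then
            if PySem.Int.mod column j = 0 then acc2 ++ [[i, j]] else acc2
          else acc2) acc) []
    [sub_matrix]

-- ===== PORT B =====
-- the 'while d >= 1' loop of _divisors_desc: collects divisors of n from d down to 1
def pvDivisorsDesc (n : Int) (d : Int) : List Int :=
  if h : 1 ≤ d then
    if PySem.Int.mod n d = 0 then d :: pvDivisorsDesc n (d - 1)
    else pvDivisorsDesc n (d - 1)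
  else []
termination_by d.toNat
decreasing_by all_goals omega

def get_block_sizes_alt (matrix_sparse : List (List Int)) : List (List (List Int)) :=
  match PySem.List.pyGet? matrix_sparse 0 with
  | none => []        -- matrix_sparse[0] raises IndexError; excluded by Pre_
  | some row0 =>
    let row_divs := pvDivisorsDesc (matrix_sparse.length : Int) ((matrix_sparse.length : Int) - 1)
    let col_divs := pvDivisorsDesc (row0.length : Int) ((row0.length : Int) - 1)
    let rev := (row_divs.flatMap (fun i => col_divs.map (fun j => [i, j]))).reverse
    [rev]

-- ===== PRECONDITION & SPEC =====
-- Pre_ excludes only the empty matrix, on which A raises IndexError at matrix_sparse[0].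
def Pre_get_block_sizes (matrix_sparse : List (List Int)) : Prop := matrix_sparse ≠ []
instance (matrix_sparse : List (List Int)) : Decidable (Pre_get_block_sizes matrix_sparse) := by unfold Pre_get_block_sizes; infer_instance
def pvWitness_get_block_sizes : List (List Int) := [[5, 7], [1, 2]]

def Spec_get_block_sizes (matrix_sparse : List (List Int)) (out : List (List (List Int))) : Prop := out = get_block_sizes_alt matrix_sparse
instance (matrix_sparse : List (List Int)) (out : List (List (List Int))) : Decidable (Spec_get_block_sizes matrix_sparse out) := by unfold Spec_get_block_sizes; infer_instance

-- ===== CLAIM (what is proved, stated in full; the proofs are below) =====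
def Claim_equal_get_block_sizes : Prop := ∀ (matrix_sparse : List (List Int)), Dom_get_block_sizes matrix_sparse → Pre_get_block_sizes matrix_sparse → Spec_get_block_sizes matrix_sparse (get_block_sizes matrix_sparse)

-- ===== LEMMAS AND PROOFS =====

-- A's inner loop over j, for a fixed i: if p i holds it appends [i, j] for every j with q j.
theorem inner_loop_eq (C : List Int) (p q : Int → Prop) [DecidablePred p] [DecidablePred q]
    (i : Int) (acc : List (List Int)) :
    C.foldl (fun acc2 j => if p i then if q j then acc2 ++ [[i, j]] else acc2 else acc2) acc
      = acc ++ if p i then (C.filter (fun j => q j)).map (fun j => [i, j]) else [] := by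
  induction C generalizing acc with
  | nil => simp
  | cons c cs ih =>
    simp only [List.foldl_cons, ih]
    by_cases hp : p i <;> by_cases hq : q c <;> simp [hp, hq]

theorem flatten_map_ite (rs : List Int) (p : Int → Prop) [DecidablePred p]
    (g : Int → List (List Int)) :
    (rs.map (fun x => if p x then g x else [])).flatten
      = (rs.filter (fun x => p x)).flatMap g := by
  induction rs with
  | nil => simp
  | cons r rs ih => by_cases hp : p r <;> simp [hp, ih]

-- A's outer loop equals a flatMap over the filtered (ascending) divisor lists.
theorem outer_loop_eq (R C : List Int) (p q : Int → Prop) [DecidablePred p] [DecidablePred q]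
    (acc : List (List Int)) :
    R.foldl (fun acc i =>
        C.foldl (fun acc2 j => if p i then if q j then acc2 ++ [[i, j]] else acc2 else acc2) acc) acc
      = acc ++ (R.filter (fun i => p i)).flatMap (fun i => (C.filter (fun j => q j)).map (fun j => [i, j])) := by
  induction R generalizing acc with
  | nil => simp
  | cons r rs ih =>
    simp only [List.foldl_cons, inner_loop_eq]
    by_cases hp : p r <;> simp [hp, flatten_map_ite]

-- B's descending divisor scan is the reverse of the ascending filtered range.
theorem divisorsDesc_eq (n : Int) : ∀ (k : Nat) (d : Int), d.toNat = k →
    pvDivisorsDesc n d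
      = ((PySem.List.pyRange 1 (d + 1) 1).filter (fun i => decide (PySem.Int.mod n i = 0))).reverse := by
  intro k
  induction k with
  | zero =>
    intro d hd
    rw [pvDivisorsDesc]
    have h1 : ¬ (1 ≤ d) := by omega
    rw [PySem.List.pyRange_one_eq_nil (by omega : d + 1 ≤ 1)]
    simp [h1]
  | succ k ih =>
    intro d hd
    have h1 : 1 ≤ d := by omega
    rw [pvDivisorsDesc]
    rw [show d + 1 = (d - 1 + 1) + 1 by ring,
        PySem.List.pyRange_one_succ_right (by omega : (1:Int) ≤ d - 1 + 1)]
    rw [ih (d - 1) (by omega)]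
    by_cases hm : PySem.Int.mod n d = 0 <;>
      simp [h1, hm, List.filter_append, show d - 1 + 1 = d by ring]

-- reversing the cross product of the reversed lists gives the ascending cross product
theorem rev_cross (xs ys : List Int) (f : Int → Int → List Int) :
    (xs.reverse.flatMap (fun i => ys.reverse.map (f i))).reverse
      = xs.flatMap (fun i => ys.map (f i)) := by
  induction xs with
  | nil => simp
  | cons x xt ih =>
    simp only [List.reverse_cons, List.flatMap_append, List.flatMap_cons, List.flatMap_nil,
      List.append_nil, List.reverse_append, ih, List.flatMap_cons]
    congr 1
    induction ys with
    | nil => simp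
    | cons y yt _ => simp

-- ===== VERDICT (by name: the statement is the Claim_ definition above) =====
theorem get_block_sizes_spec : Claim_equal_get_block_sizes := by
  intro m _ hpre
  unfold Spec_get_block_sizes get_block_sizes get_block_sizes_alt
  cases h : PySem.List.pyGet? m 0 with
  | none => rfl
  | some row0 =>
    simp only []
    rw [outer_loop_eq]
    rw [divisorsDesc_eq (m.length : Int) ((m.length : Int) - 1).toNat _ rfl,
        divisorsDesc_eq (row0.length : Int) ((row0.length : Int) - 1).toNat _ rfl]
    rw [show ((m.length : Int) - 1) + 1 = (m.length : Int) by ring,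
        show ((row0.length : Int) - 1) + 1 = (row0.length : Int) by ring]
    rw [rev_cross]
    simp
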